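-- pv_equiv track=rewrite | github.com/andersonburrus-byte/Rhymegen | scripts/preprocess.py | extract_fingerprint
-- ===== SOURCE A (Python) =====
-- VOWELS = {"IH", "UH", "AH", "EH", "ER", "IY", "EY", "AY", "OW", "UW", "AO"}
--
-- def extract_fingerprint(phonemes):
--     """Extract vowel fingerprint from phoneme sequence, combining AO+R."""
--     fingerprint = []
--     i = 0
--     while i < len(phonemes):
--         p = phonemes[i]
--         if p == "AO" and i + 1 < len(phonemes) and phonemes[i + 1] == "R":
--             fingerprint.append("AO R")
--             i += 2
--         elif p in VOWELS:
--             fingerprint.append(p)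
--             i += 1
--         else:
--             i += 1
--     return fingerprint
-- ===== SOURCE B (Python) =====
-- VOWELS = {"IH", "UH", "AH", "EH", "ER", "IY", "EY", "AY", "OW", "UW", "AO"}
--
-- def extract_fingerprint(phonemes):
--     """Two passes: a state-machine merge of adjacent AO,R (tagged pairs), then a filter."""
--     merged = []          # list of (is_merged_pair, token)
--     pending_ao = False
--     for p in phonemes:
--         if pending_ao:
--             if p == "R":
--                 merged.append((True, "AO R"))
--                 pending_ao = False
--             elif p == "AO":
--                 merged.append((False, "AO"))
--             else:
--                 merged.append((False, "AO"))
--                 merged.append((False, p))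
--                 pending_ao = False
--         elif p == "AO":
--             pending_ao = True
--         else:
--             merged.append((False, p))
--     if pending_ao:
--         merged.append((False, "AO"))
--     return [t for pair, t in merged if pair or t in VOWELS]
-- ===== Notes on version B (the rewrite author's own statement) =====
-- stated objective: alternative
-- what changed: Replaces the index-jumping lookahead while-loop with two passes: a one-pass state machine that merges adjacent AO,R into a tagged 'AO R' pair (no index arithmetic, no lookahead), followed by a filter keeping merged pairs and vowels.
import Mathlib
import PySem

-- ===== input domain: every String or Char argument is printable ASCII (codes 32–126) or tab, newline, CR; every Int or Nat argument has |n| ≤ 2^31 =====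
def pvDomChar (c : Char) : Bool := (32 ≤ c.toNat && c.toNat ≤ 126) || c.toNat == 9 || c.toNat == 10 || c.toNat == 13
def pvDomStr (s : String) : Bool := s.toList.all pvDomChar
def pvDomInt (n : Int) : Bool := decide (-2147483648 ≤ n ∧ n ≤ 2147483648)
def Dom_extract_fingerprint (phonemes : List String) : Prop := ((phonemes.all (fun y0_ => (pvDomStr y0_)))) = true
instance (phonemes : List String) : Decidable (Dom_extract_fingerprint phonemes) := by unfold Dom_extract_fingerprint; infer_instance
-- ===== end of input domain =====

-- ===== PORT A =====
-- B changes the decomposition: a one-pass state-machine merge of AO+R, then a filter (objective: alternative).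
def pvVowels : List String := ["IH", "UH", "AH", "EH", "ER", "IY", "EY", "AY", "OW", "UW", "AO"]

-- A: the while loop (index i jumping by 1 or 2) as recursion on the remaining suffix.
def extract_fingerprint : List String → List String
  | [] => []
  | p :: rest =>
      if p = "AO" ∧ rest.head? = some "R" then "AO R" :: extract_fingerprint rest.tail
      else if p ∈ pvVowels then p :: extract_fingerprint rest
      else extract_fingerprint rest
  termination_by xs => xs.length
  decreasing_by
  · simp only [List.length_cons]; simp only [List.length_tail]; omega
  · simp
  · simp

-- ===== PORT B =====
-- one step of B's merge state machine; state = (merged so far as (is_merged_pair, token), pending "AO")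
def pvStep (st : List (Bool × String) × Bool) (p : String) : List (Bool × String) × Bool :=
  let (merged, pending) := st
  if pending then
    if p = "R" then (merged ++ [(true, "AO R")], false)
    else if p = "AO" then (merged ++ [(false, "AO")], true)
    else (merged ++ [(false, "AO"), (false, p)], false)
  else if p = "AO" then (merged, true)
  else (merged ++ [(false, p)], false)

def extract_fingerprint_alt (phonemes : List String) : List String :=
  let st := phonemes.foldl pvStep ([], false)
  let merged := if st.2 then st.1 ++ [(false, "AO")] else st.1
  (merged.filter (fun t => t.1 || decide (t.2 ∈ pvVowels))).map (fun t => t.2)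

-- ===== PRECONDITION & SPEC =====
def Spec_extract_fingerprint (phonemes : List String) (out : List String) : Prop := out = extract_fingerprint_alt phonemes
instance (phonemes : List String) (out : List String) : Decidable (Spec_extract_fingerprint phonemes out) := by unfold Spec_extract_fingerprint; infer_instance

-- ===== CLAIM (what is proved, stated in full; the proofs are below) =====
def Claim_equal_extract_fingerprint : Prop := ∀ (phonemes : List String), Dom_extract_fingerprint phonemes → Spec_extract_fingerprint phonemes (extract_fingerprint phonemes)

-- ===== LEMMAS AND PROOFS =====


-- the filter predicate of B's second pass
def pvKeep (t : Bool × String) : Bool := t.1 || decide (t.2 ∈ pvVowels)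

-- B's pipeline for an arbitrary pending state (proof-only helper)
def pvRun (pending : Bool) (xs : List String) : List String :=
  let st := xs.foldl pvStep ([], pending)
  let merged := if st.2 then st.1 ++ [(false, "AO")] else st.1
  (merged.filter pvKeep).map (fun t => t.2)

lemma pvAlt_eq_run (xs : List String) : extract_fingerprint_alt xs = pvRun false xs := rfl

lemma pvStep_acc (acc : List (Bool × String)) (b : Bool) (p : String) :
    pvStep (acc, b) p = (acc ++ (pvStep ([], b) p).1, (pvStep ([], b) p).2) := by
  simp only [pvStep]
  split_ifs <;> simp

lemma pvFoldl_acc (xs : List String) (acc : List (Bool × String)) (b : Bool) :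
    xs.foldl pvStep (acc, b) =
      (acc ++ (xs.foldl pvStep ([], b)).1, (xs.foldl pvStep ([], b)).2) := by
  induction xs generalizing acc b with
  | nil => simp
  | cons p rest ih =>
      rcases hs : pvStep ([], b) p with ⟨d, b'⟩
      simp only [List.foldl_cons, pvStep_acc acc b p, hs]
      rw [ih, ih d b', List.append_assoc]

lemma pvRun_cons (b : Bool) (p : String) (rest : List String) :
    pvRun b (p :: rest) =
      (((pvStep ([], b) p).1.filter pvKeep).map (fun t => t.2)) ++ pvRun (pvStep ([], b) p).2 rest := by
  rcases hs : pvStep ([], b) p with ⟨d, b'⟩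
  simp only [pvRun, List.foldl_cons, hs, pvFoldl_acc rest d b']
  by_cases h2 : (rest.foldl pvStep ([], b')).2 = true <;>
    simp [h2, List.filter_append, List.map_append, List.append_assoc]

lemma pvRun_pair (xs : List String) :
    pvRun false xs = extract_fingerprint xs ∧ pvRun true xs = extract_fingerprint ("AO" :: xs) := by
  induction xs with
  | nil => constructor <;> simp [pvRun, pvKeep, extract_fingerprint, pvVowels]
  | cons p rest ih =>
      obtain ⟨h1, h2⟩ := ih
      have hAO : "AO" ∈ pvVowels := by simp [pvVowels]
      constructor
      · by_cases hp : p = "AO"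
        · subst hp
          rw [pvRun_cons]
          simpa [pvStep, pvKeep, extract_fingerprint, hAO] using h2
        · rw [pvRun_cons]
          by_cases hv : p ∈ pvVowels <;>
            simp [pvStep, pvKeep, extract_fingerprint, hp, hv, h1]
      · by_cases hr : p = "R"
        · subst hr
          rw [pvRun_cons]
          simp [pvStep, pvKeep, extract_fingerprint, h1]
        · by_cases hp : p = "AO"
          · subst hp
            rw [pvRun_cons]
            simpa [pvStep, pvKeep, extract_fingerprint, hr, hAO] using h2
          · rw [pvRun_cons]
            by_cases hv : p ∈ pvVowels <;>
              simp [pvStep, pvKeep, extract_fingerprint, hr, hp, hv, hAO, h1]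

-- ===== VERDICT (by name: the statement is the Claim_ definition above) =====
theorem extract_fingerprint_spec : Claim_equal_extract_fingerprint := by
  intro phonemes _
  unfold Spec_extract_fingerprint
  rw [pvAlt_eq_run, (pvRun_pair phonemes).1]
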